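-- pv_equiv track=rewrite | github.com/GenjunLiu/scripts | feature.py | find_min_needed_sents
-- ===== SOURCE A (Python) =====
-- import copy
--
-- def find_min_needed_sents(feat_sent_mat, want_feat_count, index):
--   all_zero = True
--   for count in want_feat_count:
--     if count != 0:
--       all_zero = False
--   # all want feature count is ZERO, finish
--   if all_zero:
--     return True, []
--
--   # fail to find
--   if index >= len(feat_sent_mat[0]):
--     return False, []
--
--   # select current sentence
--   new_count = copy.deepcopy(want_feat_count)
--   for i in range(0, len(want_feat_count)):
--     if not feat_sent_mat[i][index]:
--       continue
--     if new_count[i] > 0: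
--       new_count[i] -= 1
--   success_1, sent_list_1 = find_min_needed_sents(feat_sent_mat, new_count,
--                                                  index + 1)
--   # select current sentence, append
--   sent_list_1.append(index)
--
--   # drop current sentence, do not modify `want_feat_count`
--   success_2, sent_list_2 = find_min_needed_sents(feat_sent_mat, want_feat_count,
--                                                  index + 1)
--   if not success_2:
--     return success_1, sent_list_1
--   if not success_1:
--     return False, []
--   # sentence list 2 is better
--   if len(sent_list_1) > len(sent_list_2):
--     return True, sent_list_2
--   return True, sent_list_1
-- ===== SOURCE B (Python) =====
-- def find_min_needed_sents(feat_sent_mat, want_feat_count, index):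
--   memo = {}
--
--   def solve(counts, idx):
--     if all(c == 0 for c in counts):
--       return True, []
--     if idx >= len(feat_sent_mat[0]):
--       return False, []
--     key = (idx, counts)
--     if key in memo:
--       return memo[key]
--     new_counts = tuple(
--         c - 1 if feat_sent_mat[i][idx] and c > 0 else c
--         for i, c in enumerate(counts))
--     ok1, lst1 = solve(new_counts, idx + 1)
--     lst1 = lst1 + [idx]
--     ok2, lst2 = solve(counts, idx + 1)
--     if not ok2:
--       res = ok1, lst1
--     elif not ok1:
--       res = False, []
--     elif len(lst1) > len(lst2):
--       res = True, lst2
--     else: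
--       res = True, lst1
--     memo[key] = res
--     return res
--
--   return solve(tuple(want_feat_count), index)
-- ===== Notes on version B (the rewrite author's own statement) =====
-- stated objective: faster
-- what changed: Replaces A's naive exponential take/drop recursion with the same recursion memoized on the state (index, tuple(counts)), so each reachable state is solved once.
import Mathlib
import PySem

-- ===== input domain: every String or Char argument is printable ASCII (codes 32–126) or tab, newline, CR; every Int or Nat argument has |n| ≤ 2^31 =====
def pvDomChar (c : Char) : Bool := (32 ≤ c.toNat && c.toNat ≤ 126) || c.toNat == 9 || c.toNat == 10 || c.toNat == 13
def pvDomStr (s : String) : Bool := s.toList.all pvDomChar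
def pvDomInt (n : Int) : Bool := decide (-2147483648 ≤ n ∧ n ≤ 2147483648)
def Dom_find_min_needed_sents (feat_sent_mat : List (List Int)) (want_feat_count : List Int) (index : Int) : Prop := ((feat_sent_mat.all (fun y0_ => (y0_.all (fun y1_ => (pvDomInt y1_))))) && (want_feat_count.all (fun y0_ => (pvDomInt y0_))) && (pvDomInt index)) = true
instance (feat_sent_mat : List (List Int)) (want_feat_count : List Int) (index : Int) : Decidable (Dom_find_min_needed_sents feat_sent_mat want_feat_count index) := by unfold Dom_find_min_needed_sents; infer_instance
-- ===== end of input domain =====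

-- B replaces A's exponential branch-on-every-column recursion by the same recursion memoized
-- on the state (index, counts); equivalence is about the RETURN value (A mutates nothing observable).

-- ===== PORT A =====
-- literal transliteration of Source A's find_min_needed_sents
def find_min_needed_sents (feat_sent_mat : List (List Int)) (want_feat_count : List Int) (index : Int) : Bool × List Int :=
  let all_zero := want_feat_count.foldl (fun az c => if c ≠ 0 then false else az) true
  if all_zero then (true, [])
  else if _h : (((PySem.List.pyGet? feat_sent_mat 0).getD []).length : Int) ≤ index then (false, [])
  else
    let new_count := (List.range want_feat_count.length).foldl
      (fun (nc : List Int) (i : Nat) =>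
        if (PySem.List.pyGet? ((PySem.List.pyGet? feat_sent_mat (i : Int)).getD []) index).getD 0 = 0 then nc
        else if 0 < PySem.List.pyGetD nc (i : Int) 0 then nc.set i (PySem.List.pyGetD nc (i : Int) 0 - 1)
        else nc) want_feat_count
    let r1 := find_min_needed_sents feat_sent_mat new_count (index + 1)
    let l1 := r1.2 ++ [index]
    let r2 := find_min_needed_sents feat_sent_mat want_feat_count (index + 1)
    if !r2.1 then (r1.1, l1)
    else if !r1.1 then (false, [])
    else if r2.2.length < l1.length then (true, r2.2)
    else (true, l1)
termination_by ((((PySem.List.pyGet? feat_sent_mat 0).getD []).length : Int) - index).toNat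
decreasing_by all_goals omega

-- ===== PORT B =====
-- Source B's `solve`, with the memo dictionary threaded explicitly
def pvSolveB (feat_sent_mat : List (List Int)) (counts : List Int) (idx : Int)
    (memo : PySem.Dict (Int × List Int) (Bool × List Int)) :
    (Bool × List Int) × PySem.Dict (Int × List Int) (Bool × List Int) :=
  if counts.all (fun c => c == 0) then ((true, []), memo)
  else if _h : (((PySem.List.pyGet? feat_sent_mat 0).getD []).length : Int) ≤ idx then ((false, []), memo)
  else
    match memo.get? (idx, counts) with
    | some v => (v, memo)
    | none =>
      let new_counts := (PySem.List.enumerate counts 0).map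
        (fun p => if (PySem.List.pyGet? ((PySem.List.pyGet? feat_sent_mat p.1).getD []) idx).getD 0 ≠ 0 ∧ 0 < p.2 then p.2 - 1 else p.2)
      let s1 := pvSolveB feat_sent_mat new_counts (idx + 1) memo
      let l1 := s1.1.2 ++ [idx]
      let s2 := pvSolveB feat_sent_mat counts (idx + 1) s1.2
      let res := if !s2.1.1 then (s1.1.1, l1)
                 else if !s1.1.1 then (false, [])
                 else if s2.1.2.length < l1.length then (true, s2.1.2)
                 else (true, l1)
      (res, s2.2.insert (idx, counts) res)
termination_by ((((PySem.List.pyGet? feat_sent_mat 0).getD []).length : Int) - idx).toNat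
decreasing_by all_goals omega

def find_min_needed_sents_alt (feat_sent_mat : List (List Int)) (want_feat_count : List Int) (index : Int) : Bool × List Int :=
  (pvSolveB feat_sent_mat want_feat_count index PySem.Dict.empty).1

-- ===== PRECONDITION & SPEC =====
-- Pre_ excludes exactly the inputs on which the Python raises IndexError: with a nonzero
-- requirement it reads len(feat_sent_mat[0]) and, for every column it ever visits
-- (index ≤ j < len(feat_sent_mat[0])), every entry feat_sent_mat[i][j] for i < len(want_feat_count).
def Pre_find_min_needed_sents (feat_sent_mat : List (List Int)) (want_feat_count : List Int) (index : Int) : Prop :=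
  (∃ c ∈ want_feat_count, c ≠ 0) →
    (feat_sent_mat ≠ [] ∧
      (index < (feat_sent_mat.headI.length : Int) →
        (want_feat_count.length ≤ feat_sent_mat.length ∧
          ∀ r ∈ feat_sent_mat.take want_feat_count.length,
            -(r.length : Int) ≤ index ∧ (feat_sent_mat.headI.length : Int) ≤ (r.length : Int))))
instance (feat_sent_mat : List (List Int)) (want_feat_count : List Int) (index : Int) : Decidable (Pre_find_min_needed_sents feat_sent_mat want_feat_count index) := by unfold Pre_find_min_needed_sents; infer_instance

def pvWitness_find_min_needed_sents : List (List Int) × List Int × Int := ([[1, 0], [0, 1]], [1, 1], 0)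

def Spec_find_min_needed_sents (feat_sent_mat : List (List Int)) (want_feat_count : List Int) (index : Int) (out : Bool × List Int) : Prop := out = find_min_needed_sents_alt feat_sent_mat want_feat_count index
instance (feat_sent_mat : List (List Int)) (want_feat_count : List Int) (index : Int) (out : Bool × List Int) : Decidable (Spec_find_min_needed_sents feat_sent_mat want_feat_count index out) := by unfold Spec_find_min_needed_sents; infer_instance

-- ===== CLAIM (what is proved, stated in full; the proofs are below) =====
def Claim_equal_find_min_needed_sents : Prop := ∀ (feat_sent_mat : List (List Int)) (want_feat_count : List Int) (index : Int), Dom_find_min_needed_sents feat_sent_mat want_feat_count index → Pre_find_min_needed_sents feat_sent_mat want_feat_count index → Spec_find_min_needed_sents feat_sent_mat want_feat_count index (find_min_needed_sents feat_sent_mat want_feat_count index)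

-- ===== LEMMAS AND PROOFS =====

-- A's all_zero accumulator loop is List.all
lemma pv_allzero_foldl (w : List Int) (b : Bool) :
    w.foldl (fun az c => if c ≠ 0 then false else az) b = (b && w.all (fun c => c == 0)) := by
  induction w generalizing b with
  | nil => simp
  | cons x xs ih =>
    simp only [List.foldl_cons, List.all_cons]
    rw [ih]
    by_cases hx : x = 0 <;> simp [hx]

-- the per-position update both loops perform
def pvG (feat_sent_mat : List (List Int)) (idx : Int) (i : Int) (c : Int) : Int :=
  if (PySem.List.pyGet? ((PySem.List.pyGet? feat_sent_mat i).getD []) idx).getD 0 ≠ 0 ∧ 0 < c then c - 1 else c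

-- A's index loop, characterized as a mapIdx over its prefix
lemma pv_loopA (m : List (List Int)) (idx : Int) (w : List Int) :
    ∀ k, k ≤ w.length →
      (List.range k).foldl
        (fun (nc : List Int) (i : Nat) =>
          if (PySem.List.pyGet? ((PySem.List.pyGet? m (i : Int)).getD []) idx).getD 0 = 0 then nc
          else if 0 < PySem.List.pyGetD nc (i : Int) 0 then nc.set i (PySem.List.pyGetD nc (i : Int) 0 - 1)
          else nc) w
      = (w.take k).mapIdx (fun i c => pvG m idx (i : Int) c) ++ w.drop k := by
  intro k hk
  induction k with
  | zero => simp
  | succ k ih =>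
    have hkw : k < w.length := by omega
    have hA : ((w.take k).mapIdx (fun i c => pvG m idx (i : Int) c)).length = k := by
      simp [List.length_take]; omega
    have hdrop : w.drop k = w[k] :: w.drop (k + 1) := List.drop_eq_getElem_cons hkw
    have hmap : (w.take (k + 1)).mapIdx (fun i c => pvG m idx (i : Int) c)
        = (w.take k).mapIdx (fun i c => pvG m idx (i : Int) c) ++ [pvG m idx (k : Int) w[k]] := by
      rw [← List.take_concat_get' w k hkw, List.mapIdx_append_one]
      simp [List.length_take, Nat.min_eq_left (Nat.le_of_lt hkw)]
    have hget : PySem.List.pyGetD ((w.take k).mapIdx (fun i c => pvG m idx (i : Int) c) ++ w[k] :: w.drop (k + 1)) (k : Int) 0 = w[k] := by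
      rw [PySem.List.pyGetD_natCast, List.getD_eq_getElem?_getD, List.getElem?_append_right (by omega)]
      simp [hA, List.getElem?_eq_getElem hkw]
    have hset : ∀ v, (((w.take k).mapIdx (fun i c => pvG m idx (i : Int) c) ++ w[k] :: w.drop (k + 1)).set k v)
        = (w.take k).mapIdx (fun i c => pvG m idx (i : Int) c) ++ v :: w.drop (k + 1) := by
      intro v
      simp only [List.set_append, hA]
      rw [if_neg (by omega), Nat.sub_self, List.set_cons_zero]
    rw [List.range_succ, List.foldl_append, ih (by omega), hdrop, hmap]
    simp only [List.foldl_cons, List.foldl_nil, hget, hset]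
    by_cases h1 : (PySem.List.pyGet? (m[k]?.getD []) idx).getD 0 = 0
    · simp [h1, pvG]
    · by_cases h2 : (0 : Int) < w[k]
      · simp [h1, h2, pvG]
      · simp [h1, h2, pvG]

-- B's enumerate-map is the same mapIdx
lemma pv_loopB (m : List (List Int)) (idx : Int) (w : List Int) :
    (PySem.List.enumerate w 0).map
      (fun p => if (PySem.List.pyGet? ((PySem.List.pyGet? m p.1).getD []) idx).getD 0 ≠ 0 ∧ 0 < p.2 then p.2 - 1 else p.2)
    = w.mapIdx (fun i c => pvG m idx (i : Int) c) := by
  have aux : ∀ (w : List Int) (s : Int),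
      (PySem.List.enumerate w s).map
        (fun p => if (PySem.List.pyGet? ((PySem.List.pyGet? m p.1).getD []) idx).getD 0 ≠ 0 ∧ 0 < p.2 then p.2 - 1 else p.2)
      = w.mapIdx (fun i c => pvG m idx (s + (i : Int)) c) := by
    intro w
    induction w with
    | nil => intro s; simp [PySem.List.enumerate]
    | cons x xs ih =>
      intro s
      rw [PySem.List.enumerate_cons, List.map_cons, List.mapIdx_cons, ih (s + 1)]
      refine congrArg₂ List.cons ?_ ?_
      · simp [pvG]
      · congr 1
        funext i c
        rw [show s + 1 + (i : Int) = s + ((i + 1 : Nat) : Int) by push_cast; ring]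
  rw [aux w 0]
  congr 1
  funext i c
  rw [show (0 : Int) + (i : Int) = (i : Int) by ring]

-- memo invariant: every cached value is A's value at its key
def pvInv (m : List (List Int)) (memo : PySem.Dict (Int × List Int) (Bool × List Int)) : Prop :=
  ∀ i c v, memo.get? (i, c) = some v → v = find_min_needed_sents m c i

lemma pv_main (m : List (List Int)) :
    ∀ (n : Nat) (idx : Int) (w : List Int) (memo : PySem.Dict (Int × List Int) (Bool × List Int)),
      ((((PySem.List.pyGet? m 0).getD []).length : Int) - idx).toNat = n →
      pvInv m memo →
      (pvSolveB m w idx memo).1 = find_min_needed_sents m w idx ∧ pvInv m (pvSolveB m w idx memo).2 := by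
  intro n
  induction n with
  | zero =>
    intro idx w memo hn hinv
    rw [pvSolveB, find_min_needed_sents]
    simp only [pv_allzero_foldl, Bool.true_and]
    by_cases hz : w.all (fun c => c == 0) = true
    · simp [hz]; exact hinv
    · have hL : (((PySem.List.pyGet? m 0).getD []).length : Int) ≤ idx := by omega
      simp [hz, hL]; exact hinv
  | succ n ih =>
    intro idx w memo hn hinv
    by_cases hz : w.all (fun c => c == 0) = true
    · rw [pvSolveB, find_min_needed_sents]
      simp only [pv_allzero_foldl, Bool.true_and]
      simp [hz]; exact hinv
    · by_cases hL : (((PySem.List.pyGet? m 0).getD []).length : Int) ≤ idx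
      · rw [pvSolveB, find_min_needed_sents]
        simp only [pv_allzero_foldl, Bool.true_and]
        simp [hz, hL]; exact hinv
      · have hm1 : ((((PySem.List.pyGet? m 0).getD []).length : Int) - (idx + 1)).toNat = n := by omega
        have hAloop : (List.range w.length).foldl
            (fun (nc : List Int) (i : Nat) =>
              if (PySem.List.pyGet? ((PySem.List.pyGet? m (i : Int)).getD []) idx).getD 0 = 0 then nc
              else if 0 < PySem.List.pyGetD nc (i : Int) 0 then nc.set i (PySem.List.pyGetD nc (i : Int) 0 - 1)
              else nc) w = w.mapIdx (fun i c => pvG m idx (i : Int) c) := by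
          simpa using pv_loopA m idx w w.length le_rfl
        obtain ⟨e1, hi1⟩ := ih (idx + 1) (w.mapIdx (fun i c => pvG m idx (i : Int) c)) memo hm1 hinv
        obtain ⟨e2, hi2⟩ := ih (idx + 1) w (pvSolveB m (w.mapIdx (fun i c => pvG m idx (i : Int) c)) (idx + 1) memo).2 hm1 hi1
        have hA : find_min_needed_sents m w idx =
            (if !(pvSolveB m w (idx + 1) (pvSolveB m (w.mapIdx (fun i c => pvG m idx (i : Int) c)) (idx + 1) memo).2).1.1
             then ((pvSolveB m (w.mapIdx (fun i c => pvG m idx (i : Int) c)) (idx + 1) memo).1.1,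
                   (pvSolveB m (w.mapIdx (fun i c => pvG m idx (i : Int) c)) (idx + 1) memo).1.2 ++ [idx])
             else if !(pvSolveB m (w.mapIdx (fun i c => pvG m idx (i : Int) c)) (idx + 1) memo).1.1 then (false, [])
             else if (pvSolveB m w (idx + 1) (pvSolveB m (w.mapIdx (fun i c => pvG m idx (i : Int) c)) (idx + 1) memo).2).1.2.length <
                     ((pvSolveB m (w.mapIdx (fun i c => pvG m idx (i : Int) c)) (idx + 1) memo).1.2 ++ [idx]).length
             then (true, (pvSolveB m w (idx + 1) (pvSolveB m (w.mapIdx (fun i c => pvG m idx (i : Int) c)) (idx + 1) memo).2).1.2)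
             else (true, (pvSolveB m (w.mapIdx (fun i c => pvG m idx (i : Int) c)) (idx + 1) memo).1.2 ++ [idx])) := by
          conv_lhs => rw [find_min_needed_sents]
          simp only [pv_allzero_foldl, Bool.true_and]
          rw [if_neg hz, dif_neg hL, hAloop, ← e1, ← e2]
        rw [pvSolveB, if_neg hz, dif_neg hL, pv_loopB]
        rcases hmem : memo.get? (idx, w) with _ | v
        · refine ⟨?_, ?_⟩
          · rw [hA]
          · intro i c v' hv'
            rw [PySem.Dict.get?_insert] at hv'
            by_cases hkey : ((i, c) : Int × List Int) = (idx, w)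
            · rw [if_pos hkey] at hv'
              injection hkey with hk1 hk2
              subst hk1; subst hk2
              cases hv'
              rw [hA]
            · rw [if_neg hkey] at hv'
              exact hi2 i c v' hv'
        · exact ⟨(hinv idx w v hmem).symm ▸ rfl, hinv⟩

-- ===== VERDICT (by name: the statement is the Claim_ definition above) =====
theorem find_min_needed_sents_spec : Claim_equal_find_min_needed_sents := by
  intro m w idx _ _
  unfold Spec_find_min_needed_sents find_min_needed_sents_alt
  have h := pv_main m ((((PySem.List.pyGet? m 0).getD []).length : Int) - idx).toNat idx w PySem.Dict.empty rfl
    (by intro i c v hv; simp [PySem.Dict.get?_empty] at hv)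
  exact h.1.symm
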